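-- pv_equiv track=rewrite | github.com/miliar/Code_Jam_Webscraper | solutions_python/Problem_155/2564.py | solve
-- ===== SOURCE A (Python) =====
-- def solve(s_list):
--     current_s = 0
--     requiered_s = 0
--     invited_f = 0
--     for s in s_list:
--         if requiered_s > current_s:
--             invited_f += requiered_s - current_s
--             current_s = requiered_s
--
--         current_s += s
--         requiered_s += 1
--
--     return invited_f
-- ===== SOURCE B (Python) =====
-- def solve(s_list):
--     # Backward pass: `need` is the number of extra stamps (invited friends)
--     # required before serving the remaining suffix; the last element's
--     # stamps are never consumed, so it is skipped.
--     need = 0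
--     for s in reversed(s_list[:-1]):
--         need = max(0, need + 1 - s)
--     return need
-- ===== Notes on version B (the rewrite author's own statement) =====
-- stated objective: alternative
-- what changed: Replaces A's forward greedy carry (three state variables, conditional stamp injection) by a backward fold over all but the last element that computes the future stamp need via need = max(0, need + 1 - s).
import Mathlib
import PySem

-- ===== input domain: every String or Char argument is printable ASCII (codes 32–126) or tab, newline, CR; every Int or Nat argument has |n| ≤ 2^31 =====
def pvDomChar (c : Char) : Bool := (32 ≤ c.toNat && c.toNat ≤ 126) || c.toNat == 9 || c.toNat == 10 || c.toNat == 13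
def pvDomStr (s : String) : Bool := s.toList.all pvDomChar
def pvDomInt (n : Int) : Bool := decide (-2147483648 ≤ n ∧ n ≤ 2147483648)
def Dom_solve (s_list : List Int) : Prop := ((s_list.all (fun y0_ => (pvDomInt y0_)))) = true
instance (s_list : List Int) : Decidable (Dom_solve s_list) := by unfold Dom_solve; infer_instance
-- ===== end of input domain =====

-- B replaces A's forward greedy carry by a backward fold computing the future stamp need (alternative decomposition; same O(n)).


-- ===== PORT A =====
-- A's loop: state (current_s, requiered_s, invited_f), conditional carry before adding s.
def solveLoopA : List Int → Int → Int → Int → Int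
  | [], _, _, invited => invited
  | s :: rest, cur, req, invited =>
    let invited' := if req > cur then invited + (req - cur) else invited
    let cur' := if req > cur then req else cur
    solveLoopA rest (cur' + s) (req + 1) invited'

def solve (s_list : List Int) : Int := solveLoopA s_list 0 0 0

-- ===== PORT B =====
-- B's loop: fold over reversed(s_list[:-1]) with accumulator `need`.
def solve_alt (s_list : List Int) : Int :=
  (s_list.dropLast.reverse).foldl (fun need s => max 0 (need + 1 - s)) 0

-- ===== PRECONDITION & SPEC =====
def Spec_solve (s_list : List Int) (out : Int) : Prop := out = solve_alt s_list
instance (s_list : List Int) (out : Int) : Decidable (Spec_solve s_list out) := by unfold Spec_solve; infer_instance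

-- ===== CLAIM (what is proved, stated in full; the proofs are below) =====
def Claim_equal_solve : Prop := ∀ (s_list : List Int), Dom_solve s_list → Spec_solve s_list (solve s_list)

-- ===== LEMMAS AND PROOFS =====
-- Backward need as a foldr (B's foldl over the reversed list, rewritten).
theorem altF_eq (l : List Int) :
    solve_alt l = l.dropLast.foldr (fun s need => max 0 (need + 1 - s)) 0 := by
  simp [solve_alt, List.foldl_reverse]

-- Closed form of A's loop on a nonempty list, in terms of B's backward need.
theorem loopA_closed (rest : List Int) : ∀ (s cur req inv : Int),
    solveLoopA (s :: rest) cur req inv =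
      inv + max 0 (((s :: rest).dropLast).foldr (fun x need => max 0 (need + 1 - x)) 0 + (req - cur)) := by
  induction rest with
  | nil =>
    intro s cur req inv
    simp only [solveLoopA, List.dropLast, List.foldr]
    split_ifs with h <;> omega
  | cons t rest ih =>
    intro s cur req inv
    have step : solveLoopA (s :: t :: rest) cur req inv =
        solveLoopA (t :: rest) ((if req > cur then req else cur) + s) (req + 1)
          (if req > cur then inv + (req - cur) else inv) := by
      simp only [solveLoopA]
    rw [step, ih]
    have hd : (s :: t :: rest).dropLast = s :: (t :: rest).dropLast := rfl
    rw [hd]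
    simp only [List.foldr]
    split_ifs with h <;> omega

-- ===== VERDICT (by name: the statement is the Claim_ definition above) =====
theorem solve_spec : Claim_equal_solve := by
  intro l _
  unfold Spec_solve solve
  rw [altF_eq]
  cases l with
  | nil => rfl
  | cons s rest =>
    rw [loopA_closed]
    have h0 : (0 : Int) ≤ (s :: rest).dropLast.foldr (fun x need => max 0 (need + 1 - x)) 0 := by
      cases (s :: rest).dropLast with
      | nil => simp
      | cons a t => simp
    omega
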